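-- pv_equiv track=rewrite | github.com/muzychka20/step | python/work/w4/m.py | count_elemnts
-- ===== SOURCE A (Python) =====
-- def count_elemnts(list):
--     positive = negative = even = odd = 0
--     for el in list:
--         if el < 0:
--             negative += 1
--         else:
--             positive += 1
--
--         if el % 2:
--             odd += 1
--         else:
--             even += 1
--     return positive, negative, even, odd
-- ===== SOURCE B (Python) =====
-- def count_elemnts(list):
--     positive = sum(1 for el in list if el >= 0)
--     negative = sum(1 for el in list if el < 0)
--     even = sum(1 for el in list if el % 2 == 0)
--     odd = sum(1 for el in list if el % 2 != 0)
--     return positive, negative, even, odd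
-- ===== Notes on version B (the rewrite author's own statement) =====
-- stated objective: idiomatic
-- what changed: Replaces the single fused loop maintaining four counters with four independent sum-over-generator aggregations (ported as countP), one per category.
import Mathlib
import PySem

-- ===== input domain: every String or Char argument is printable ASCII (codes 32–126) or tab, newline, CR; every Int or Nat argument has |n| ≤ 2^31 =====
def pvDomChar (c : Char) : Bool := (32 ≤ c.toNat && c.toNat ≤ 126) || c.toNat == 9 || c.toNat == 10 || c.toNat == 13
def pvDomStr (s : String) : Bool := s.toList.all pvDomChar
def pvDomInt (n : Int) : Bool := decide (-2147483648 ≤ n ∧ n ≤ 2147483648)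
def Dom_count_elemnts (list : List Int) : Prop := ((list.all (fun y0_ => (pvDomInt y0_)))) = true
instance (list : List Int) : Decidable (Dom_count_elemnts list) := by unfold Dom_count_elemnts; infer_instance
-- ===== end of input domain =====

-- B replaces the single fused counter loop with four independent one-condition counts (idiomatic decomposition; same cost).
-- ===== PORT A =====
-- loop body of A's for-loop (two if-chains updating the four counters)
def pvStep : (Int × Int × Int × Int) → Int → (Int × Int × Int × Int) :=
  fun st el =>
    let st1 := if el < 0 then (st.1, st.2.1 + 1, st.2.2.1, st.2.2.2)
               else (st.1 + 1, st.2.1, st.2.2.1, st.2.2.2)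
    if PySem.Int.mod el 2 ≠ 0 then (st1.1, st1.2.1, st1.2.2.1, st1.2.2.2 + 1)
    else (st1.1, st1.2.1, st1.2.2.1 + 1, st1.2.2.2)

def count_elemnts (list : List Int) : Int × Int × Int × Int :=
  list.foldl pvStep (0, 0, 0, 0)

-- ===== PORT B =====
def count_elemnts_alt (list : List Int) : Int × Int × Int × Int :=
  ((list.countP (fun el => 0 ≤ el) : Int),
   (list.countP (fun el => el < 0) : Int),
   (list.countP (fun el => PySem.Int.mod el 2 == 0) : Int),
   (list.countP (fun el => PySem.Int.mod el 2 != 0) : Int))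

-- ===== PRECONDITION & SPEC =====
def Spec_count_elemnts (list : List Int) (out : Int × Int × Int × Int) : Prop := out = count_elemnts_alt list
instance (list : List Int) (out : Int × Int × Int × Int) : Decidable (Spec_count_elemnts list out) := by unfold Spec_count_elemnts; infer_instance

-- ===== CLAIM (what is proved, stated in full; the proofs are below) =====
def Claim_equal_count_elemnts : Prop := ∀ (list : List Int), Dom_count_elemnts list → Spec_count_elemnts list (count_elemnts list)

-- ===== LEMMAS AND PROOFS =====

-- ===== VERDICT (by name: the statement is the Claim_ definition above) =====
theorem count_elemnts_fold (l : List Int) (p n e o : Int) :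
    l.foldl pvStep (p, n, e, o)
    = (p + (l.countP (fun el => 0 ≤ el) : Int),
       n + (l.countP (fun el => el < 0) : Int),
       e + (l.countP (fun el => PySem.Int.mod el 2 == 0) : Int),
       o + (l.countP (fun el => PySem.Int.mod el 2 != 0) : Int)) := by
  induction l generalizing p n e o with
  | nil => simp
  | cons x xs ih =>
    rw [List.foldl_cons]
    have hstep : pvStep (p, n, e, o) x =
        ((if x < 0 then p else p + 1), (if x < 0 then n + 1 else n),
         (if PySem.Int.mod x 2 = 0 then e + 1 else e),
         (if PySem.Int.mod x 2 = 0 then o else o + 1)) := by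
      unfold pvStep
      by_cases hx : x < 0 <;> by_cases hm : PySem.Int.mod x 2 = 0 <;>
        simp only [hx, hm, ite_true, ite_false, ne_eq, not_true_eq_false,
          not_false_eq_true]
    rw [hstep, ih]
    simp only [List.countP_cons]
    by_cases hx : x < 0 <;> by_cases hm : PySem.Int.mod x 2 = 0 <;>
      simp only [hx, hm, ite_true, ite_false, decide_true, decide_false,
        beq_iff_eq, bne_iff_ne, ne_eq, decide_eq_true_eq, Prod.mk.injEq] <;>
      refine ⟨?_, ?_, ?_, ?_⟩ <;>
      · first
          | (simp [not_le.mpr hx]; try push_cast; try ring)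
          | (simp [not_lt.mp hx]; try push_cast; try ring)
          | (simp [hx, hm]; try push_cast; try ring)

theorem count_elemnts_spec : Claim_equal_count_elemnts := by
  intro l _
  unfold Spec_count_elemnts count_elemnts count_elemnts_alt
  rw [count_elemnts_fold]
  simp
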